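-- pv_equiv track=rewrite | github.com/AryaKesharwani/litcoder | labs/Module_2_Python_LAB_1/Reverse_a_string.py | reverse_string_preserving_special_characters
-- ===== SOURCE A (Python) =====
-- def reverse_string_preserving_special_characters(input_string):
--     # Extract letters and store non-letter positions with their characters
--     letters = [char for char in input_string if char.isalpha()]
--     letters.reverse()  # Reverse the list of letters
--
--     # Reconstruct the string with reversed letters in the correct positions
--     output_list = list(input_string)  # Convert string to list to modify it
--     letter_index = 0  # Start with the first letter in the reversed list
--
--     for i in range(len(output_list)):
--         if output_list[i].isalpha():  # If the character is a letter
--             output_list[i] = letters[letter_index]  # Replace it with the reversed letter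
--             letter_index += 1  # Move to the next letter in the reversed list
--
--     return ''.join(output_list)  # Join list back into string
-- ===== SOURCE B (Python) =====
-- def reverse_string_preserving_special_characters(input_string):
--     # Two converging pointers swapping letters in place; non-letters never move.
--     chars = list(input_string)
--     i, j = 0, len(chars) - 1
--     while i < j:
--         if not chars[i].isalpha():
--             i += 1
--         elif not chars[j].isalpha():
--             j -= 1
--         else:
--             chars[i], chars[j] = chars[j], chars[i]
--             i += 1
--             j -= 1
--     return ''.join(chars)
-- ===== Notes on version B (the rewrite author's own statement) =====
-- stated objective: idiomatic
-- what changed: Instead of extracting the letters into an auxiliary list, reversing it and rewriting every letter position in a second pass, B walks two converging pointers from both ends of a single char list and swaps letter pairs in place.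
import Mathlib
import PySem

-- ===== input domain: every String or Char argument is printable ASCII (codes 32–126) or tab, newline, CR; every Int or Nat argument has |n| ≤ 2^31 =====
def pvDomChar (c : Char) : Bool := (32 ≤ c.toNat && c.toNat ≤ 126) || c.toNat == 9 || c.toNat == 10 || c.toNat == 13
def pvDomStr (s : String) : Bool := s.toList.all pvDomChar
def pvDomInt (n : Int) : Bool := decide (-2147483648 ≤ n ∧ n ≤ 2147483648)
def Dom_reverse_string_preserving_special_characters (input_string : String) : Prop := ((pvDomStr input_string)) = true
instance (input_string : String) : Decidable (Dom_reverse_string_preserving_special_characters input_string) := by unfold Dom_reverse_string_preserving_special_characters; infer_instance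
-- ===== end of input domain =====

-- B replaces A's extract-reverse-refill (auxiliary letters list + second rewriting pass)
-- with an in-place two-converging-pointers swap over a single char list (idiomatic; same cost).


-- ===== PORT A =====
-- A's rewriting pass: walk output_list; at each letter take letters[letter_index] and bump
-- letter_index.  Ported by consuming the reversed-letters list head by head — exact, since
-- `letters` holds one entry per alpha char of the string, so the index never overruns.
def pvFillA : List Char → List Char → List Char
  | [], _ => []
  | c :: t, ls =>
      if PySem.Chars.isalpha c then ls.headD c :: pvFillA t ls.tail
      else c :: pvFillA t ls

def reverse_string_preserving_special_characters (input_string : String) : String :=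
  -- letters = [c for c in s if c.isalpha()]; letters.reverse()
  let letters := (input_string.toList.filter PySem.Chars.isalpha).reverse
  -- the for-loop over output_list, then ''.join
  String.ofList (pvFillA input_string.toList letters)

-- ===== PORT B =====
-- Source B's while-loop; chars[i]/chars[j] via getD ' ': exact, since the loop only reads
-- indices with 0 ≤ i < j ≤ len-1, which are always in range.
def pvSwapLoop (l : List Char) (i j : Nat) : List Char :=
  if _h : i < j then
    if ¬ PySem.Chars.isalpha (l.getD i ' ') then pvSwapLoop l (i+1) j
    else if ¬ PySem.Chars.isalpha (l.getD j ' ') then pvSwapLoop l i (j-1)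
    else pvSwapLoop ((l.set i (l.getD j ' ')).set j (l.getD i ' ')) (i+1) (j-1)
  else l
termination_by j - i
decreasing_by all_goals simp_all; all_goals omega

def reverse_string_preserving_special_characters_alt (input_string : String) : String :=
  -- chars = list(s); i, j = 0, len(chars)-1  (for the empty string Python's j = -1 and the
  -- loop body never runs, exactly as with Nat's 0 - 1 = 0 here); while-loop; ''.join(chars)
  let chars := input_string.toList
  String.ofList (pvSwapLoop chars 0 (chars.length - 1))

-- ===== PRECONDITION & SPEC =====
def Spec_reverse_string_preserving_special_characters (input_string : String) (out : String) : Prop := out = reverse_string_preserving_special_characters_alt input_string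
instance (input_string : String) (out : String) : Decidable (Spec_reverse_string_preserving_special_characters input_string out) := by unfold Spec_reverse_string_preserving_special_characters; infer_instance

-- ===== CLAIM (what is proved, stated in full; the proofs are below) =====
def Claim_equal_reverse_string_preserving_special_characters : Prop := ∀ (input_string : String), Dom_reverse_string_preserving_special_characters input_string → Spec_reverse_string_preserving_special_characters input_string (reverse_string_preserving_special_characters input_string)

-- ===== LEMMAS AND PROOFS =====

theorem pvFillA_append (xs ys R : List Char) :
    pvFillA (xs ++ ys) R
      = pvFillA xs R ++ pvFillA ys (R.drop (xs.filter PySem.Chars.isalpha).length) := by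
  induction xs generalizing R with
  | nil => simp [pvFillA]
  | cons c t ih =>
      by_cases hc : PySem.Chars.isalpha c = true
      · simp [pvFillA, hc, ih, ← List.drop_tail]
      · simp [pvFillA, hc, ih]

theorem pvFillA_append_right (xs R E : List Char)
    (h : (xs.filter PySem.Chars.isalpha).length ≤ R.length) :
    pvFillA xs (R ++ E) = pvFillA xs R := by
  induction xs generalizing R with
  | nil => simp [pvFillA]
  | cons c t ih =>
      by_cases hc : PySem.Chars.isalpha c = true
      · simp only [List.filter_cons, hc, if_pos, List.length_cons] at h
        obtain ⟨r, R', rfl⟩ : ∃ r R', R = r :: R' := by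
          cases R with
          | nil => simp at h
          | cons r R' => exact ⟨r, R', rfl⟩
        simp [pvFillA, hc, ih _ (by simpa using Nat.le_of_succ_le_succ h)]
      · simp only [List.filter_cons, hc] at h
        simp [pvFillA, hc, ih _ (by simpa using h)]

-- The loop invariant: pvSwapLoop rewrites exactly the window [i, j] the way A's refill does.
theorem pvSwapLoop_eq (l : List Char) (i j : Nat)
    (hij : i ≤ j + 1) (hj : i < j → j < l.length) :
    pvSwapLoop l i j
      = l.take i
        ++ pvFillA ((l.drop i).take (j + 1 - i))
             ((((l.drop i).take (j + 1 - i)).filter PySem.Chars.isalpha).reverse)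
        ++ l.drop (j + 1) := by
  induction l, i, j using pvSwapLoop.induct with
  | case1 l i j h hc ih =>
      have hjlen := hj h
      have hilen : i < l.length := lt_trans h hjlen
      have hc0 := hc
      rw [List.getD_eq_getElem l ' ' hilen] at hc
      have hc' : PySem.Chars.isalpha l[i] = false := by simpa using hc
      have hseg : (l.drop i).take (j + 1 - i) = l[i] :: (l.drop (i + 1)).take (j - i) := by
        rw [List.drop_eq_getElem_cons hilen, show j + 1 - i = (j - i) + 1 by omega,
          List.take_succ_cons]
      have htake : l.take (i + 1) = l.take i ++ [l[i]] := by
        rw [List.take_add_one, List.getElem?_eq_getElem hilen]; rfl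
      rw [pvSwapLoop, dif_pos h, if_pos hc0,
        ih (by omega) (fun _ => hjlen), show j + 1 - (i + 1) = j - i by omega, hseg]
      have hfil : (l[i] :: (l.drop (i + 1)).take (j - i)).filter PySem.Chars.isalpha
          = ((l.drop (i + 1)).take (j - i)).filter PySem.Chars.isalpha := by
        simp [hc']
      rw [hfil, pvFillA, if_neg (by simp [hc']), htake]
      simp only [List.append_assoc, List.singleton_append]
  | case2 l i j h hc hd ih =>
      have hjlen := hj h
      have hilen : i < l.length := lt_trans h hjlen
      have hc0 := hc
      have hd0 := hd
      rw [List.getD_eq_getElem l ' ' hilen] at hc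
      rw [List.getD_eq_getElem l ' ' hjlen] at hd
      have hc' : PySem.Chars.isalpha l[i] = true := by simpa using hc
      have hd' : PySem.Chars.isalpha l[j] = false := by simpa using hd
      have hseg : (l.drop i).take (j + 1 - i)
          = (l.drop i).take (j - i) ++ [l[j]] := by
        rw [show j + 1 - i = (j - i) + 1 by omega, List.take_add_one, List.getElem?_drop,
          show i + (j - i) = j by omega, List.getElem?_eq_getElem hjlen]; rfl
      have hdropj : l.drop j = l[j] :: l.drop (j + 1) := List.drop_eq_getElem_cons hjlen
      rw [pvSwapLoop, dif_pos h, if_neg hc0, if_pos hd0,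
        ih (by omega) (fun h2 => by omega), show j - 1 + 1 = j by omega, hseg, hdropj]
      have hfil2 : ((l.drop i).take (j - i) ++ [l[j]]).filter PySem.Chars.isalpha
          = ((l.drop i).take (j - i)).filter PySem.Chars.isalpha := by
        simp [List.filter_append, hd']
      rw [hfil2, pvFillA_append]
      simp [pvFillA, hd']
  | case3 l i j h hc hd ih =>
      have hjlen := hj h
      have hilen : i < l.length := lt_trans h hjlen
      have hc0 := hc
      have hd0 := hd
      rw [List.getD_eq_getElem l ' ' hilen] at hc
      rw [List.getD_eq_getElem l ' ' hjlen] at hd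
      have hc' : PySem.Chars.isalpha l[i] = true := by simpa using hc
      have hd' : PySem.Chars.isalpha l[j] = true := by simpa using hd
      set c := l[i] with hcdef
      set d := l[j] with hddef
      set l' := (l.set i (l.getD j ' ')).set j (l.getD i ' ') with hl'def
      have hl' : l' = (l.set i d).set j c := by
        rw [hl'def, List.getD_eq_getElem l ' ' hilen, List.getD_eq_getElem l ' ' hjlen]
      have hlen' : l'.length = l.length := by simp [hl']
      set mid := (l.drop (i + 1)).take (j - i - 1) with hmiddef
      set Rm := ((mid.filter PySem.Chars.isalpha).reverse) with hRmdef
      -- the three array facts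
      have hti : l'.take i = l.take i := by
        apply List.ext_getElem
        · simp [hlen']
        · intro k hk1 hk2
          have hk : k < i := by simp only [List.length_take, hlen'] at hk1; omega
          simp [List.getElem_take, hl',
            show ¬ j = k by omega, show ¬ i = k by omega]
      have hl'i : l'[i]? = some d := by
        rw [List.getElem?_eq_getElem (by rw [hlen']; exact lt_trans h hjlen)]
        simp [hl', show ¬ j = i by omega]
      have F1 : l'.take (i + 1) = l.take i ++ [d] := by
        rw [List.take_add_one, hti, hl'i]; rfl
      have F2 : l'.drop j = c :: l.drop (j + 1) := by
        have : l'.drop j = l'[j] :: l'.drop (j + 1) :=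
          List.drop_eq_getElem_cons (by rw [hlen']; exact hjlen)
        rw [this]
        have h1 : l'[j] = c := by simp [hl']
        have h2 : l'.drop (j + 1) = l.drop (j + 1) := by
          apply List.ext_getElem
          · simp [hlen']
          · intro k hk1 hk2
            simp [List.getElem_drop, hl',
              show ¬j = j + 1 + k by omega, show ¬i = j + 1 + k by omega]
        rw [h1, h2]
      have F3 : (l'.drop (i + 1)).take (j - i - 1) = mid := by
        rw [hmiddef]
        apply List.ext_getElem
        · simp [hlen']
        · intro k hk1 hk2
          have hkb : i + 1 + k < j := by
            simp only [List.length_take, List.length_drop, hlen'] at hk1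
            omega
          simp [List.getElem_take, List.getElem_drop, hl',
            show ¬j = i + 1 + k by omega, show ¬i = i + 1 + k by omega]
      have F4 : (l.drop i).take (j + 1 - i) = c :: mid ++ [d] := by
        rw [List.drop_eq_getElem_cons hilen, show j + 1 - i = (j - i - 1) + 1 + 1 by omega,
          List.take_succ_cons, List.take_add_one, List.getElem?_drop,
          show i + 1 + (j - i - 1) = j by omega, List.getElem?_eq_getElem hjlen, hmiddef]
        rfl
      have hfilter : ((l.drop i).take (j + 1 - i)).filter PySem.Chars.isalpha
          = c :: mid.filter PySem.Chars.isalpha ++ [d] := by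
        rw [F4]; simp [List.filter_append, hc', hd']
      have hfill : pvFillA ((l.drop i).take (j + 1 - i))
            ((((l.drop i).take (j + 1 - i)).filter PySem.Chars.isalpha).reverse)
          = d :: pvFillA mid Rm ++ [c] := by
        rw [hfilter, F4]
        have hrev : (c :: mid.filter PySem.Chars.isalpha ++ [d]).reverse
            = d :: Rm ++ [c] := by simp [hRmdef]
        rw [hrev]
        show pvFillA (c :: (mid ++ [d])) (d :: (Rm ++ [c])) = _
        rw [pvFillA, if_pos hc']
        simp only [List.headD_cons, List.tail_cons]
        rw [pvFillA_append, pvFillA_append_right mid Rm [c] (by simp [hRmdef]),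
          show (mid.filter PySem.Chars.isalpha).length = Rm.length by simp [hRmdef],
          List.drop_left]
        simp [pvFillA, hd']
      have hj'2 : i + 1 < j - 1 → j - 1 < l'.length := by
        intro _; rw [hlen']; omega
      rw [pvSwapLoop, dif_pos h,
        if_neg hc0, if_neg hd0,
        ih (by omega) hj'2,
        show j - 1 + 1 = j by omega, show j - (i + 1) = j - i - 1 by omega, F1, F2, F3, hfill]
      rw [hRmdef]
      simp
  | case4 l i j h =>
      rw [pvSwapLoop, dif_neg h]
      rcases Nat.lt_or_ge j l.length with hjl | hjl
      · have hi : i = j ∨ i = j + 1 := by omega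
        rcases hi with rfl | rfl
        · have hseg : (l.drop i).take (i + 1 - i) = [l[i]] := by
            rw [List.drop_eq_getElem_cons hjl, show i + 1 - i = 1 by omega]
            rfl
          rw [hseg]
          have hone : pvFillA [l[i]] (([l[i]].filter PySem.Chars.isalpha).reverse)
              = [l[i]] := by
            by_cases ha : PySem.Chars.isalpha l[i] = true <;>
              simp [pvFillA, ha]
          rw [hone]
          conv_lhs => rw [← List.take_append_drop i l]
          rw [List.drop_eq_getElem_cons hjl]
          simp
        · simp only [show j + 1 - (j + 1) = 0 from by omega, List.take_zero, pvFillA,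
            List.filter_nil, List.reverse_nil]
          simp
      · have h1 : l.drop (j + 1) = [] := by
          rw [List.drop_eq_nil_iff]; omega
        rcases Nat.lt_or_ge i l.length with hil | hil
        · have hi : i = j := by omega
          subst hi
          exact absurd hjl (by omega)
        · have h2 : l.drop i = [] := by rw [List.drop_eq_nil_iff]; omega
          have h3 : l.take i = l := List.take_of_length_le hil
          simp [h1, h2, h3, pvFillA]

-- ===== VERDICT (by name: the statement is the Claim_ definition above) =====
theorem reverse_string_preserving_special_characters_spec : Claim_equal_reverse_string_preserving_special_characters := by
  intro s _
  show _ = _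
  unfold reverse_string_preserving_special_characters reverse_string_preserving_special_characters_alt
  cases hL : s.toList with
  | nil => simp [pvSwapLoop, pvFillA]
  | cons c t =>
      have key := pvSwapLoop_eq (c :: t) 0 ((c :: t).length - 1) (by omega) (fun _ => by simp)
      simp only [List.drop_zero, List.take_zero, List.nil_append, List.length_cons,
        Nat.add_sub_cancel] at key ⊢
      have htake : (c :: t).take (t.length + 1 - 0) = c :: t := by
        simp [List.take_of_length_le]
      have hdrop : (c :: t).drop (t.length + 1) = [] := by
        simp [List.drop_of_length_le]
      rw [htake, hdrop, List.append_nil] at key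
      rw [key]
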